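-- pv_equiv track=rewrite | github.com/Ander456/py_program | day88.py | CountNextElement3
-- ===== SOURCE A (Python) =====
-- def CountNextElement3(nums):
--     ans = 0
--     for i in range(len(nums)):
--         for j in range(i):
--             if nums[j] + 1 == nums[i]:
--                 ans += 1
--                 break
--     return ans
-- ===== SOURCE B (Python) =====
-- def CountNextElement3(nums):
--     first = {}
--     for i, v in enumerate(nums):
--         first.setdefault(v, i)
--     ans = 0
--     for i, v in enumerate(nums):
--         w = first.get(v - 1)
--         if w is not None and w < i:
--             ans += 1
--     return ans
-- ===== Notes on version B (the rewrite author's own statement) =====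
-- stated objective: faster
-- what changed: Replaces the quadratic nested scan (for each i, rescan all earlier elements for nums[i]-1) with two linear passes: first build a dict mapping each value to its first occurrence index, then count indices i whose value minus one has a first occurrence before i.
import Mathlib
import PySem

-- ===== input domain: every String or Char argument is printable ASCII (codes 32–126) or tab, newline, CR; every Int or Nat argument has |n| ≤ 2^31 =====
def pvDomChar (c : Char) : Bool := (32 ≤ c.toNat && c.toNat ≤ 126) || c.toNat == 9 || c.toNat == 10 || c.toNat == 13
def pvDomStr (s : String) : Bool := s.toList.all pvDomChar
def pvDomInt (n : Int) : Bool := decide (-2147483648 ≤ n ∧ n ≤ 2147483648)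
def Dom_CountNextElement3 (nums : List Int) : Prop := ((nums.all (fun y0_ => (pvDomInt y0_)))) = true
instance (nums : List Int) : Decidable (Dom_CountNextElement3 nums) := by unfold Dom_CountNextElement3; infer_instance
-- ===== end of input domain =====

-- B replaces A's quadratic nested rescans by two linear passes over a first-occurrence dict (faster, asymptotic).


-- ===== PORT A =====
-- inner 'for j in range(i): if nums[j] + 1 == nums[i]: ans += 1; break'
def pvInnerA (nums : List Int) (vi : Int) : List Int → Int → Int
  | [], ans => ans
  | j :: rest, ans =>
    if PySem.List.pyGetD nums j 0 + 1 = vi then ans + 1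
    else pvInnerA nums vi rest ans

def CountNextElement3 (nums : List Int) : Int :=
  (PySem.List.pyRange 0 (PySem.List.len nums)).foldl
    (fun ans i => pvInnerA nums (PySem.List.pyGetD nums i 0) (PySem.List.pyRange 0 i) ans) 0

-- ===== PORT B =====
def CountNextElement3_alt (nums : List Int) : Int :=
  let first := (PySem.List.enumerate nums).foldl (fun d p => d.setdefault p.2 p.1)
    (PySem.Dict.empty : PySem.Dict Int Int)
  (PySem.List.enumerate nums).foldl
    (fun ans p =>
      match first.get? (p.2 - 1) with
      | some w => if w < p.1 then ans + 1 else ans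
      | none => ans) 0

-- ===== PRECONDITION & SPEC =====
def Spec_CountNextElement3 (nums : List Int) (out : Int) : Prop := out = CountNextElement3_alt nums
instance (nums : List Int) (out : Int) : Decidable (Spec_CountNextElement3 nums out) := by unfold Spec_CountNextElement3; infer_instance

-- ===== CLAIM (what is proved, stated in full; the proofs are below) =====
def Claim_equal_CountNextElement3 : Prop := ∀ (nums : List Int), Dom_CountNextElement3 nums → Spec_CountNextElement3 nums (CountNextElement3 nums)

-- ===== LEMMAS AND PROOFS =====

-- the canonical count both ports are reduced to
def pvCount (nums : List Int) : Nat :=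
  (List.range nums.length).countP (fun i => decide ((nums.getD i 0 - 1) ∈ nums.take i))

theorem pvInnerA_eq (nums : List Int) (vi : Int) (js : List Int) (ans : Int) :
    pvInnerA nums vi js ans =
      if js.any (fun j => decide (PySem.List.pyGetD nums j 0 + 1 = vi)) then ans + 1 else ans := by
  induction js with
  | nil => simp [pvInnerA]
  | cons j rest ih =>
    simp only [pvInnerA, List.any_cons]
    by_cases h : PySem.List.pyGetD nums j 0 + 1 = vi <;> simp [h, ih]

theorem pv_any_succ (l : List Int) (v : Int) :
    l.any (fun x => decide (x + 1 = v)) = decide ((v - 1) ∈ l) := by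
  induction l with
  | nil => simp
  | cons a l ih =>
    rw [List.any_cons, ih]
    by_cases h : a + 1 = v
    · simp [h]; omega
    · have h' : ¬ (v - 1 = a) := by omega
      simp [h, h']

theorem pv_take_map (nums : List Int) (i : Nat) (h : i ≤ nums.length) :
    (PySem.List.pyRange 0 (i : Int)).map (fun j => PySem.List.pyGetD nums j 0) = nums.take i := by
  rw [PySem.List.pyRange_zero_natCast, List.map_map]
  apply List.ext_getElem
  · simp [h]
  · intro k hk1 hk2
    simp only [List.getElem_map, List.getElem_range, Function.comp_apply,
      PySem.List.pyGetD_natCast, List.getElem_take]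
    simp at hk1
    exact List.getD_eq_getElem nums 0 (by omega)

theorem pv_any_range (nums : List Int) (i : Nat) (h : i ≤ nums.length) (v : Int) :
    (PySem.List.pyRange 0 (i : Int)).any (fun j => decide (PySem.List.pyGetD nums j 0 + 1 = v)) =
      decide ((v - 1) ∈ nums.take i) := by
  rw [← pv_any_succ (nums.take i) v, ← pv_take_map nums i h, List.any_map]
  rfl

theorem pvA_eq (nums : List Int) : CountNextElement3 nums = (pvCount nums : Int) := by
  unfold CountNextElement3 pvCount
  rw [show PySem.List.len nums = (nums.length : Int) from rfl,
    PySem.List.pyRange_zero_natCast, List.foldl_map]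
  rw [PySem.List.foldl_congr_mem (List.range nums.length) _
    (fun ans i => if decide ((nums.getD i 0 - 1) ∈ nums.take i) then ans + 1 else ans) 0 ?_]
  · rw [PySem.List.foldl_count_if]; simp
  · intro acc i hi
    have hi' : i < nums.length := List.mem_range.mp hi
    rw [pvInnerA_eq, pv_any_range nums i (le_of_lt hi'), PySem.List.pyGetD_natCast]

theorem pv_first_get (xs : List Int) : ∀ (s : Int) (d : PySem.Dict Int Int) (w : Int),
    ((PySem.List.enumerate xs s).foldl (fun d p => d.setdefault p.2 p.1) d).get? w =
      (match d.get? w with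
       | some v => some v
       | none => (xs.findIdx? (fun y => y == w)).map (fun k => s + (k : Int))) := by
  induction xs with
  | nil => intro s d w; simp [PySem.List.enumerate_nil]; cases d.get? w <;> simp
  | cons x xs ih =>
    intro s d w
    rw [PySem.List.enumerate_cons, List.foldl_cons, ih, List.findIdx?_cons]
    by_cases hx : w = x
    · subst hx
      rw [PySem.Dict.get?_setdefault_self]
      cases hdw : d.get? w <;> simp
    · rw [PySem.Dict.get?_setdefault_of_ne d s hx]
      have hb : (x == w) = false := by simp; intro h; exact absurd h.symm hx
      cases hdw : d.get? w with
      | none =>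
        simp only [hb, Bool.false_eq_true, if_false]
        cases hfx : List.findIdx? (fun y => y == w) xs <;> simp
        ring
      | some v => simp

theorem pv_findIdx_take (xs : List Int) (w : Int) : ∀ (i : Nat),
    (match xs.findIdx? (fun y => y == w) with
     | some k => decide ((k : Int) < (i : Int))
     | none => false) = decide (w ∈ xs.take i) := by
  induction xs with
  | nil => intro i; simp
  | cons x xs ih =>
    intro i
    rw [List.findIdx?_cons]
    by_cases hx : x = w
    · subst hx
      cases i <;> simp
    · have hb : (x == w) = false := by simp [hx]
      rw [if_neg (by simp [hb])]
      cases hfi : xs.findIdx? (fun y => y == w) with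
      | none =>
        cases i with
        | zero => simp
        | succ j =>
          have hthis := ih j
          rw [hfi] at hthis
          simp [List.take_succ_cons, Ne.symm hx, ← hthis]
      | some k =>
        cases i with
        | zero =>
          simp only [Option.map_some, List.take_zero, List.not_mem_nil, decide_false]
          rw [show ((0:Nat):Int) = (0:Int) from rfl]
          simp; omega
        | succ j =>
          have hthis := ih j
          rw [hfi] at hthis
          have hiff : ((k : Int) < (j : Int)) ↔ w ∈ List.take j xs := decide_eq_decide.mp hthis
          simp only [Option.map_some, List.take_succ_cons, List.mem_cons]
          rw [decide_eq_decide]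
          constructor
          · intro h
            exact Or.inr (hiff.mp (by push_cast at h ⊢; omega))
          · rintro (h | h)
            · exact absurd h.symm hx
            · have := hiff.mpr h; push_cast; omega

theorem pvB_eq (nums : List Int) : CountNextElement3_alt nums = (pvCount nums : Int) := by
  unfold CountNextElement3_alt pvCount
  rw [PySem.List.foldl_congr_mem (PySem.List.enumerate nums) _
    (fun ans p => if decide ((p.2 - 1) ∈ nums.take p.1.toNat) then ans + 1 else ans) 0 ?_]
  · rw [PySem.List.enumerate_eq_map_pyRange nums 0,
      show PySem.List.len nums = (nums.length : Int) from rfl,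
      PySem.List.pyRange_zero_natCast, List.foldl_map, List.foldl_map]
    rw [PySem.List.foldl_congr_mem (List.range nums.length) _
      (fun ans i => if decide ((nums.getD i 0 - 1) ∈ nums.take i) then ans + 1 else ans) 0 ?_]
    · rw [PySem.List.foldl_count_if]; simp
    · intro acc i hi
      simp [PySem.List.pyGetD_natCast]
  · intro acc p hp
    obtain ⟨k, hk, rfl⟩ := (PySem.List.mem_enumerate_iff nums 0 p).mp hp
    have hfirst := pv_first_get nums 0 PySem.Dict.empty (nums[k] - 1)
    rw [PySem.Dict.get?_empty] at hfirst
    simp only [zero_add]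
    rw [hfirst]
    have hF := pv_findIdx_take nums (nums[k] - 1) k
    cases hfi : nums.findIdx? (fun y => y == nums[k] - 1) with
    | none =>
      rw [hfi] at hF
      simp only []
      have hmem : ¬ (nums[k] - 1 ∈ nums.take k) := by
        simpa using hF.symm
      simp [hmem]
    | some m =>
      rw [hfi] at hF
      simp only [Int.toNat_natCast]
      by_cases hmem : nums[k] - 1 ∈ List.take k nums
      · simp only [hmem, decide_true] at hF
        have hm : (m : Int) < (k : Int) := by simpa using hF
        simp [hmem, hm]
      · simp only [hmem, decide_false] at hF
        have hm : ¬ (m : Int) < (k : Int) := by simpa using hF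
        simp [hmem, hm]

-- ===== VERDICT (by name: the statement is the Claim_ definition above) =====
theorem CountNextElement3_spec : Claim_equal_CountNextElement3 := by
  intro nums _
  unfold Spec_CountNextElement3
  rw [pvA_eq, pvB_eq]
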